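-- pv_equiv track=rewrite | github.com/minty99/maplestory-additional-option-simulator | simulator.py | update
-- ===== SOURCE A (Python) =====
-- def update(currStatus: dict, selected: str, value: int = None):
--     """
--     currStatus dict에 selected 된 스탯을 추가한다.
--
--     Args:
--         currStatus: dict
--         selected: 선택된 스탯의 이름 (opStr)
--
--     Returns:
--         updated currStatus
--     """
--
--     # TODO: 옵션별 값 추가 (value)
--     if selected in ["DSD", "DSI", "DSL", "DDI", "DDL", "DIL"]:
--         # 이중 스탯
--         statStr = selected[1:]
--         if "S" in statStr:
--             currStatus = update(currStatus, "STR", value)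
--         if "D" in statStr:
--             currStatus = update(currStatus, "DEX", value)
--         if "I" in statStr:
--             currStatus = update(currStatus, "INT", value)
--         if "L" in statStr:
--             currStatus = update(currStatus, "LUK", value)
--     else:
--         currStatus[selected] += value
--     return currStatus
-- ===== SOURCE B (Python) =====
-- DUAL = {"DSD", "DSI", "DSL", "DDI", "DDL", "DIL"}
-- LETTER = {"S": "STR", "D": "DEX", "I": "INT", "L": "LUK"}
--
--
-- def update(currStatus: dict, selected: str, value: int = None):
--     targets = [LETTER[c] for c in selected[1:]] if selected in DUAL else [selected]
--     for name in targets: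
--         currStatus[name] += value
--     return currStatus
-- ===== Notes on version B (the rewrite author's own statement) =====
-- stated objective: simpler
-- what changed: Replaces the one-level recursion with four fixed membership checks by a letter-to-stat-name table and one flat loop over the computed target list.
import Mathlib
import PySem

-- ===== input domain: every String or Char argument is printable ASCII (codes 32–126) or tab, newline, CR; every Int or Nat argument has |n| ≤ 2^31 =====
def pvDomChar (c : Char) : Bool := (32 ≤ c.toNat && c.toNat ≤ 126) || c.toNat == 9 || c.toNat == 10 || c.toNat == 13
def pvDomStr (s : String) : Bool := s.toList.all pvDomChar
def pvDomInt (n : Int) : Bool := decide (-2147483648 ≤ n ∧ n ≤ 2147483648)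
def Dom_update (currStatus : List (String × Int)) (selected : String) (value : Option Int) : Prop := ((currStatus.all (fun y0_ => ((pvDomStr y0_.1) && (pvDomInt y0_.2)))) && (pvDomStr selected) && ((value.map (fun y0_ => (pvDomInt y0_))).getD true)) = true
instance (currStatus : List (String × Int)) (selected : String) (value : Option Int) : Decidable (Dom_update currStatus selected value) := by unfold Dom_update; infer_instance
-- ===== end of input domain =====

-- B flattens A's one-level recursion into a letter→stat-name table and a single loop over the
-- target list (objective: simpler). Both Pythons mutate currStatus in place identically; the
-- equivalence proved here is about the returned dict (which is that same object).

-- ===== PORT A =====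
-- `currStatus[k] += value` (shared by both sources verbatim); Python raises KeyError / TypeError
-- where get?/value is none — those inputs are excluded by Pre_update, the port leaves d unchanged.
def addStat (d : PySem.Dict String Int) (k : String) (v : Option Int) : PySem.Dict String Int :=
  match d.get? k, v with
  | some w, some x => d.insert k (w + x)
  | _, _ => d

def dualCodes : List String := ["DSD", "DSI", "DSL", "DDI", "DDL", "DIL"]

def updateDict (d : PySem.Dict String Int) (selected : String) (value : Option Int) :
    PySem.Dict String Int :=
  if hdual : selected ∈ dualCodes then
    let statStr := selected.toList.drop 1      -- selected[1:]; "S" in statStr etc. is a 1-char membership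
    let d1 := if 'S' ∈ statStr then updateDict d "STR" value else d
    let d2 := if 'D' ∈ statStr then updateDict d1 "DEX" value else d1
    let d3 := if 'I' ∈ statStr then updateDict d2 "INT" value else d2
    let d4 := if 'L' ∈ statStr then updateDict d3 "LUK" value else d3
    d4
  else
    addStat d selected value
termination_by (if selected ∈ dualCodes then 1 else 0)
decreasing_by all_goals (rw [if_pos hdual]; decide)

def update (currStatus : List (String × Int)) (selected : String) (value : Option Int) :
    List (String × Int) :=
  (updateDict (PySem.Dict.ofList currStatus) selected value).items

-- ===== PORT B =====
def dualSet : PySem.Set String := PySem.Set.ofList ["DSD", "DSI", "DSL", "DDI", "DDL", "DIL"]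

def letterTable : PySem.Dict Char String :=
  PySem.Dict.ofList [('S', "STR"), ('D', "DEX"), ('I', "INT"), ('L', "LUK")]

def update_alt (currStatus : List (String × Int)) (selected : String) (value : Option Int) :
    List (String × Int) :=
  let d := PySem.Dict.ofList currStatus
  -- LETTER[c]: for every dual code the letters are among S,D,I,L, so the "" default is never used
  let targets := if selected ∈ dualSet then
      (selected.toList.drop 1).map (fun c => letterTable.getD c "")
    else [selected]
  (targets.foldl (fun acc t => addStat acc t value) d).items

-- ===== PRECONDITION & SPEC =====
def statName (c : Char) : String :=
  if c = 'S' then "STR" else if c = 'D' then "DEX" else if c = 'I' then "INT" else "LUK"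

-- Pre_ excludes exactly the inputs where Python A raises: value=None (TypeError in `+=`) or a
-- required stat key absent from the dict (KeyError).
def Pre_update (currStatus : List (String × Int)) (selected : String) (value : Option Int) : Prop :=
  value ≠ none ∧
  (if selected ∈ (["DSD", "DSI", "DSL", "DDI", "DDL", "DIL"] : List String) then
     ((selected.toList.drop 1).all fun c => (currStatus.map Prod.fst).contains (statName c)) = true
   else selected ∈ currStatus.map Prod.fst)
instance (currStatus : List (String × Int)) (selected : String) (value : Option Int) : Decidable (Pre_update currStatus selected value) := by unfold Pre_update; infer_instance

def pvWitness_update : (List (String × Int)) × String × Option Int :=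
  ([("STR", 1), ("DEX", 2), ("INT", 3), ("LUK", 4)], "DSD", some 5)

def Spec_update (currStatus : List (String × Int)) (selected : String) (value : Option Int) (out : List (String × Int)) : Prop := out = update_alt currStatus selected value
instance (currStatus : List (String × Int)) (selected : String) (value : Option Int) (out : List (String × Int)) : Decidable (Spec_update currStatus selected value out) := by unfold Spec_update; infer_instance

-- ===== CLAIM (what is proved, stated in full; the proofs are below) =====
def Claim_equal_update : Prop := ∀ (currStatus : List (String × Int)) (selected : String) (value : Option Int), Dom_update currStatus selected value → Pre_update currStatus selected value → Spec_update currStatus selected value (update currStatus selected value)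

-- ===== LEMMAS AND PROOFS =====
theorem updateDict_nonDual (d : PySem.Dict String Int) (s : String) (v : Option Int)
    (h : s ∉ dualCodes) : updateDict d s v = addStat d s v := by
  rw [updateDict, dif_neg h]

theorem updateDict_STR (d : PySem.Dict String Int) (v : Option Int) :
    updateDict d "STR" v = addStat d "STR" v := updateDict_nonDual d "STR" v (by decide)
theorem updateDict_DEX (d : PySem.Dict String Int) (v : Option Int) :
    updateDict d "DEX" v = addStat d "DEX" v := updateDict_nonDual d "DEX" v (by decide)
theorem updateDict_INT (d : PySem.Dict String Int) (v : Option Int) :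
    updateDict d "INT" v = addStat d "INT" v := updateDict_nonDual d "INT" v (by decide)
theorem updateDict_LUK (d : PySem.Dict String Int) (v : Option Int) :
    updateDict d "LUK" v = addStat d "LUK" v := updateDict_nonDual d "LUK" v (by decide)

theorem updateDict_DSD (d : PySem.Dict String Int) (v : Option Int) :
    updateDict d "DSD" v = addStat (addStat d "STR" v) "DEX" v := by
  rw [updateDict, dif_pos (by decide)]
  simp [updateDict_STR, updateDict_DEX]

theorem updateDict_DSI (d : PySem.Dict String Int) (v : Option Int) :
    updateDict d "DSI" v = addStat (addStat d "STR" v) "INT" v := by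
  rw [updateDict, dif_pos (by decide)]
  simp [updateDict_STR, updateDict_INT]

theorem updateDict_DSL (d : PySem.Dict String Int) (v : Option Int) :
    updateDict d "DSL" v = addStat (addStat d "STR" v) "LUK" v := by
  rw [updateDict, dif_pos (by decide)]
  simp [updateDict_STR, updateDict_LUK]

theorem updateDict_DDI (d : PySem.Dict String Int) (v : Option Int) :
    updateDict d "DDI" v = addStat (addStat d "DEX" v) "INT" v := by
  rw [updateDict, dif_pos (by decide)]
  simp [updateDict_DEX, updateDict_INT]

theorem updateDict_DDL (d : PySem.Dict String Int) (v : Option Int) :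
    updateDict d "DDL" v = addStat (addStat d "DEX" v) "LUK" v := by
  rw [updateDict, dif_pos (by decide)]
  simp [updateDict_DEX, updateDict_LUK]

theorem updateDict_DIL (d : PySem.Dict String Int) (v : Option Int) :
    updateDict d "DIL" v = addStat (addStat d "INT" v) "LUK" v := by
  rw [updateDict, dif_pos (by decide)]
  simp [updateDict_INT, updateDict_LUK]

theorem update_equiv (currStatus : List (String × Int)) (selected : String) (value : Option Int) :
    update currStatus selected value = update_alt currStatus selected value := by
  by_cases h : selected ∈ dualCodes
  · simp only [dualCodes, List.mem_cons, List.not_mem_nil, or_false] at h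
    rcases h with h | h | h | h | h | h <;> subst h
    · rw [update, updateDict_DSD]; rfl
    · rw [update, updateDict_DSI]; rfl
    · rw [update, updateDict_DSL]; rfl
    · rw [update, updateDict_DDI]; rfl
    · rw [update, updateDict_DDL]; rfl
    · rw [update, updateDict_DIL]; rfl
  · rw [update, updateDict_nonDual _ _ _ h, update_alt]
    have h' : ¬ selected ∈ dualSet := by
      simpa [dualSet, PySem.Set.mem_ofList, dualCodes] using h
    simp [h']

-- ===== VERDICT (by name: the statement is the Claim_ definition above) =====
theorem update_spec : Claim_equal_update := by
  intro cs s v _ _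
  exact update_equiv cs s v
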